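-- pv_equiv track=rewrite | github.com/TAM-WD/360 | API/Admin/get_list_of_users_v2.py | mask_token
-- ===== SOURCE A (Python) =====
-- def mask_token(token: str) -> str:
--     """Маскирует токен символами для отображения."""
--     if not token:
--         return "(пусто)"
--     symbols = "█▓▒░◆◇●○■□▲△"
--     masked = ""
--     for i, ch in enumerate(token):
--         masked += symbols[i % len(symbols)]
--     return masked
-- ===== SOURCE B (Python) =====
-- def mask_token(token: str) -> str:
--     """Маскирует токен символами для отображения."""
--     if not token:
--         return "(пусто)"
--     symbols = "█▓▒░◆◇●○■□▲△"
--     n, L = len(token), len(symbols)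
--     return (symbols * ((n + L - 1) // L))[:n]
-- ===== Notes on version B (the rewrite author's own statement) =====
-- stated objective: faster
-- what changed: Replaces the per-character loop that appends one mask symbol at a time with a closed-form construction: repeat the symbol pattern ceil(n/L) times and slice to length n.
import Mathlib
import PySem

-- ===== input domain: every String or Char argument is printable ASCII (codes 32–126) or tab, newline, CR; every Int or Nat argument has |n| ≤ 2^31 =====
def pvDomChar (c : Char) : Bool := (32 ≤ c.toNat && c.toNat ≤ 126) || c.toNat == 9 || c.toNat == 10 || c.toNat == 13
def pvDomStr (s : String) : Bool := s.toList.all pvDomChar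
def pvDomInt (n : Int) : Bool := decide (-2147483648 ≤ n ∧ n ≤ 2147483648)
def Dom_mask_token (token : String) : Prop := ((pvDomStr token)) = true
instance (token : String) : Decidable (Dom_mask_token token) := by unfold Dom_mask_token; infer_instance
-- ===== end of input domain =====

-- B replaces the per-character loop with a closed form: repeat the symbol pattern ⌈n/L⌉ times and slice to n (measured faster by a constant factor).

-- ===== PORT A =====
-- Literal port: loop over enumerate(token), appending symbols[i % len(symbols)].
-- pyGetD is exact here: i % 12 is always in range, so Python never raises.
def mask_token (token : String) : String :=
  if token.toList = [] then "(пусто)"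
  else
    let symbols : List Char := "█▓▒░◆◇●○■□▲△".toList
    let masked : List Char :=
      (PySem.List.enumerate token.toList 0).foldl
        (fun acc p => acc ++ [PySem.List.pyGetD symbols (PySem.Int.mod p.1 (symbols.length : Int)) ' ']) []
    String.ofList masked

-- ===== PORT B =====
-- Literal port of Source B: (symbols * ((n + L - 1) // L))[:n]; '//' on nonnegative Nats is Nat division,
-- string repetition is flatten ∘ replicate, and the slice [:n] with 0 ≤ n is List.take n.
def mask_token_alt (token : String) : String :=
  if token.toList = [] then "(пусто)"
  else
    let symbols : List Char := "█▓▒░◆◇●○■□▲△".toList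
    let n := token.toList.length
    let L := symbols.length
    String.ofList (List.take n (List.flatten (List.replicate ((n + L - 1) / L) symbols)))

-- ===== PRECONDITION & SPEC =====
def Spec_mask_token (token : String) (out : String) : Prop := out = mask_token_alt token
instance (token : String) (out : String) : Decidable (Spec_mask_token token out) := by unfold Spec_mask_token; infer_instance

-- ===== CLAIM (what is proved, stated in full; the proofs are below) =====
def Claim_equal_mask_token : Prop := ∀ (token : String), Dom_mask_token token → Spec_mask_token token (mask_token token)

-- ===== LEMMAS AND PROOFS =====

-- the concrete symbol list
def pvSyms : List Char := "█▓▒░◆◇●○■□▲△".toList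

lemma pvSyms_len : pvSyms.length = 12 := by decide

-- one period of the pattern, written as a map over range 12, is the pattern itself
lemma pvPeriod : (List.range 12).map (fun j => pvSyms.getD (j % 12) ' ') = pvSyms := by decide

-- flattened replication is the range-map of the cyclic indexer
lemma pvFlatten (k : Nat) :
    List.flatten (List.replicate k pvSyms)
      = (List.range (k * 12)).map (fun j => pvSyms.getD (j % 12) ' ') := by
  induction k with
  | zero => simp
  | succ k ih =>
    have hrep : List.replicate (k + 1) pvSyms = List.replicate k pvSyms ++ [pvSyms] :=
      List.replicate_succ' ..
    have hrange : List.range ((k + 1) * 12) = List.range (k * 12) ++ (List.range 12).map (k * 12 + ·) := by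
      have : (k + 1) * 12 = k * 12 + 12 := by ring
      rw [this, List.range_add]
    rw [hrep, List.flatten_append, ih, hrange, List.map_append, List.map_map]
    congr 1
    have hone : List.flatten [pvSyms] = pvSyms := by simp
    rw [hone]
    symm
    calc (List.range 12).map ((fun j => pvSyms.getD (j % 12) ' ') ∘ (k * 12 + ·))
        = (List.range 12).map (fun j => pvSyms.getD (j % 12) ' ') := by
          refine List.map_congr_left (fun j hj => ?_)
          simp only [Function.comp]
          congr 1
          omega
      _ = pvSyms := pvPeriod

-- taking n of the range-map keeps the same map over range n
lemma pvTake (n m : Nat) (h : n ≤ m) (f : Nat → Char) :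
    List.take n ((List.range m).map f) = (List.range n).map f := by
  rw [← List.map_take, List.take_range, Nat.min_eq_left h]

-- A's fold over enumerate equals the range-map of the cyclic indexer
lemma pvFold (xs : List Char) :
    (PySem.List.enumerate xs 0).foldl
        (fun acc p => acc ++ [PySem.List.pyGetD pvSyms (PySem.Int.mod p.1 (pvSyms.length : Int)) ' ']) []
      = (List.range xs.length).map (fun j => pvSyms.getD (j % 12) ' ') := by
  rw [PySem.List.foldl_append_singleton_eq_map]
  have h1 : (PySem.List.enumerate xs 0).map
        (fun p => PySem.List.pyGetD pvSyms (PySem.Int.mod p.1 (pvSyms.length : Int)) ' ')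
      = ((PySem.List.enumerate xs 0).map (·.1)).map
        (fun i => PySem.List.pyGetD pvSyms (PySem.Int.mod i (pvSyms.length : Int)) ' ') := by
    rw [List.map_map]; rfl
  rw [List.nil_append, h1, PySem.List.map_fst_enumerate]
  have h2 : PySem.List.pyRange 0 (0 + (xs.length : Int)) 1
      = List.map (fun (j : Nat) => (j : Int)) (List.range xs.length) := by
    rw [Int.zero_add]
    exact PySem.List.pyRange_zero_natCast xs.length
  rw [h2, List.map_map]
  refine List.map_congr_left (fun j _ => ?_)
  simp only [Function.comp, pvSyms_len]
  rw [PySem.Int.mod_natCast, PySem.List.pyGetD_natCast]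

-- ===== VERDICT (by name: the statement is the Claim_ definition above) =====
theorem mask_token_spec : Claim_equal_mask_token := by
  intro token _
  unfold Spec_mask_token mask_token mask_token_alt
  by_cases h : token.toList = []
  · simp [h]
  · simp only [h, if_false]
    have hs : ("█▓▒░◆◇●○■□▲△".toList : List Char) = pvSyms := rfl
    simp only [hs, pvSyms_len]
    have hA := pvFold token.toList
    simp only [pvSyms_len] at hA
    rw [hA, pvFlatten, pvTake _ _ (by omega)]
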